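-- pv_equiv track=rewrite | github.com/michaelede/Wordle-Solver | solver.py | unused_letter_dict
-- ===== SOURCE A (Python) =====
-- def unused_letter_dict(word_list, guess):
--     """
--     Used for filtering a dictionary of words containing any letters from the
--     guess (i.e. all greens, yellows, greys removed). You would use this to
--     maximise your range of known letters. Especially useful on second guess.
--     """
--     filtered_words = []
--     guess_list = list(guess)
--     for word in word_list:
--         obey_all = True
--         for letter in range(0, len(word)):
--             if word[letter] in guess_list:
--                 obey_all = False
--         if obey_all:
--             filtered_words.append(word)
--     return filtered_words
-- ===== SOURCE B (Python) =====
-- def unused_letter_dict(word_list, guess):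
--     """
--     Used for filtering a dictionary of words containing any letters from the
--     guess (i.e. all greens, yellows, greys removed). You would use this to
--     maximise your range of known letters. Especially useful on second guess.
--     """
--     remaining = word_list
--     for ch in dict.fromkeys(guess):
--         remaining = [w for w in remaining if ch not in w]
--     return remaining
-- ===== Notes on version B (the rewrite author's own statement) =====
-- stated objective: alternative
-- what changed: Inverts the loop structure: instead of scanning each word's characters against list(guess) with an obey_all flag, B iterates over the distinct guess letters and removes, in successive C-level 'ch not in w' filtering passes, the words containing that letter.
import Mathlib
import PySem

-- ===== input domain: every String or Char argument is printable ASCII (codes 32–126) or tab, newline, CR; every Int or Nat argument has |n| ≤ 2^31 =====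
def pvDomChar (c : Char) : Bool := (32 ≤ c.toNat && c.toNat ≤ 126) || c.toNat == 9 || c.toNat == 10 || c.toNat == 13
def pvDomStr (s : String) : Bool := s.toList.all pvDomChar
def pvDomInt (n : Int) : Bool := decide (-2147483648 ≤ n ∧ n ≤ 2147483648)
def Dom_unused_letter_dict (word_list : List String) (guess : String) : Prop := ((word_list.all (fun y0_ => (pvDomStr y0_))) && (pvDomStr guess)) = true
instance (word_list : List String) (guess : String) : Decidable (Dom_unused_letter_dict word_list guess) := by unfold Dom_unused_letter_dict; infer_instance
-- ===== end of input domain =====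

-- B inverts the loop structure: it iterates over the distinct guess letters and removes,
-- in successive filtering passes over the word list, the words containing that letter,
-- instead of A's per-word character scan against list(guess) with an obey_all flag
-- (objective: alternative decomposition, similar cost).

-- ===== PORT A =====
def unused_letter_dict (word_list : List String) (guess : String) : List String :=
  let guess_list := guess.toList
  word_list.foldl (fun filtered_words word =>
    let obey_all :=
      (PySem.List.pyRange 0 (PySem.Str.len word) 1).foldl (fun obey_all letter =>
        if guess_list.contains (PySem.List.pyGetD word.toList letter ' ') then false
        else obey_all) true
    if obey_all then filtered_words ++ [word] else filtered_words) []

-- ===== PORT B =====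
def unused_letter_dict_alt (word_list : List String) (guess : String) : List String :=
  (PySem.List.dedup guess.toList).foldl
    (fun remaining ch => remaining.filter (fun w => !(w.toList.contains ch))) word_list

-- ===== PRECONDITION & SPEC =====
def Spec_unused_letter_dict (word_list : List String) (guess : String) (out : List String) : Prop := out = unused_letter_dict_alt word_list guess
instance (word_list : List String) (guess : String) (out : List String) : Decidable (Spec_unused_letter_dict word_list guess out) := by unfold Spec_unused_letter_dict; infer_instance

-- ===== CLAIM (what is proved, stated in full; the proofs are below) =====
def Claim_equal_unused_letter_dict : Prop := ∀ (word_list : List String) (guess : String), Dom_unused_letter_dict word_list guess → Spec_unused_letter_dict word_list guess (unused_letter_dict word_list guess)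

-- ===== LEMMAS AND PROOFS =====

-- A's obey_all flag loop computes 'no character of l satisfies p'
lemma foldl_flag_eq_all (p : Char → Bool) (l : List Char) (init : Bool) :
    l.foldl (fun obey c => if p c then false else obey) init
      = (init && l.all (fun c => !p c)) := by
  induction l generalizing init with
  | nil => simp
  | cons c t ih =>
    simp only [List.foldl_cons, List.all_cons, ih]
    by_cases h : p c = true <;> simp [h]

-- B's staged filtering passes amount to one filter by 'no letter of ls occurs in w'
lemma foldl_filter_eq_filter_all (ls : List Char) (ws : List String) :
    ls.foldl (fun remaining ch => remaining.filter (fun w => !(w.toList.contains ch))) ws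
      = ws.filter (fun w => ls.all (fun ch => !(w.toList.contains ch))) := by
  induction ls generalizing ws with
  | nil => simp
  | cons c t ih =>
    simp only [List.foldl_cons, ih, List.filter_filter, List.all_cons]
    apply List.filter_congr
    intro w _
    exact Bool.and_comm _ _

-- the two membership conditions agree: w shares no letter with guess
lemma all_not_contains_comm (g w : List Char) :
    w.all (fun c => !g.contains c) = (PySem.List.dedup g).all (fun c => !w.contains c) := by
  rw [Bool.eq_iff_iff]
  simp only [List.all_eq_true, Bool.not_eq_eq_eq_not, Bool.not_true,
    List.contains_eq_mem, decide_eq_false_iff_not, PySem.List.mem_dedup]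
  exact ⟨fun h c hc hw => h _ hw hc, fun h c hc hg => h _ hg hc⟩

-- ===== VERDICT (by name: the statement is the Claim_ definition above) =====
theorem unused_letter_dict_spec : Claim_equal_unused_letter_dict := by
  intro word_list guess _
  unfold Spec_unused_letter_dict unused_letter_dict unused_letter_dict_alt
  rw [PySem.List.foldl_append_if_eq_filter, List.nil_append,
      foldl_filter_eq_filter_all]
  apply List.filter_congr
  intro w _
  rw [PySem.Str.len_eq, PySem.List.foldl_pyRange_zero_pyGetD' w.toList ' '
        (fun obey c => if guess.toList.contains c then false else obey) true,
      foldl_flag_eq_all, Bool.true_and, all_not_contains_comm]
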